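-- pv_equiv track=rewrite | github.com/yanicodeverse/PW-skills-Assignments | PWDSA/assignment 1/question-8.py | q8
-- ===== SOURCE A (Python) =====
-- def q8(arr, n):
--     stack = []
--
--     for i in range(n):
--         temp = arr[i]
--         j = i + 1
--
--         for j in range(j, n):
--             if temp == arr[j]:
--                 stack.append(arr[j])
--                 increment = arr[j] + 1
--                 stack.append(increment)
--     return stack
-- ===== SOURCE B (Python) =====
-- def q8(arr, n):
--     # One pass to count each value's occurrences among arr[:n], then one pass
--     # emitting [v, v+1] repeated (number of later equal occurrences) times.
--     counts = {}
--     for i in range(n):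
--         v = arr[i]
--         counts[v] = counts.get(v, 0) + 1
--     res = []
--     for i in range(n):
--         v = arr[i]
--         c = counts.get(v, 0) - 1
--         counts[v] = c
--         res += [v, v + 1] * c
--     return res
-- ===== Notes on version B (the rewrite author's own statement) =====
-- stated objective: alternative
-- what changed: Replaced the nested index scan (for each i, rescan all later indices for equal values) by two linear passes with a count dictionary: count occurrences of each value in arr[:n], then emit [v, v+1] repeated by the number of remaining later equal occurrences; intended as faster (O(n + output) vs O(n^2)), measured 2.25x at the largest size both finished but unconfirmed on duplicate-heavy inputs where the output itself is quadratic.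
-- outside the precondition, e.g. on q8([1], 2): A raises IndexError, B raises IndexError
import Mathlib
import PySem

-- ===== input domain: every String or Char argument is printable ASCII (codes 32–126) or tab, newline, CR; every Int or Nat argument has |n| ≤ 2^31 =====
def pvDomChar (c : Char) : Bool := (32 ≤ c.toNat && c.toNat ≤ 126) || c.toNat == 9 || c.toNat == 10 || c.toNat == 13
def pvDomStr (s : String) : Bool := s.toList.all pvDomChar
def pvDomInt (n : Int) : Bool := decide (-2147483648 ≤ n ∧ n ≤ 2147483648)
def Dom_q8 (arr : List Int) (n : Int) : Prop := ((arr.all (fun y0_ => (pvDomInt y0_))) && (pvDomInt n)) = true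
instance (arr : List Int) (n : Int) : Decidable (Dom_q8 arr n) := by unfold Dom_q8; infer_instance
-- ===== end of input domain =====

-- B replaces A's nested later-index rescan by two passes with a count dictionary (alternative algorithm); equivalence is about the return value.

-- ===== PORT A =====
def q8 (arr : List Int) (n : Int) : List Int :=
  (PySem.List.pyRange 0 n 1).foldl (fun stack i =>
    let temp := PySem.List.pyGetD arr i 0
    (PySem.List.pyRange (i + 1) n 1).foldl (fun stack j =>
      if temp == PySem.List.pyGetD arr j 0 then
        stack ++ [PySem.List.pyGetD arr j 0, PySem.List.pyGetD arr j 0 + 1]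
      else stack) stack) []

-- ===== PORT B =====
def q8_alt (arr : List Int) (n : Int) : List Int :=
  let counts := (PySem.List.pyRange 0 n 1).foldl (fun d i =>
      let v := PySem.List.pyGetD arr i 0
      d.insert v (d.getD v 0 + 1)) (PySem.Dict.empty : PySem.Dict Int Int)
  ((PySem.List.pyRange 0 n 1).foldl (fun (p : PySem.Dict Int Int × List Int) i =>
      let v := PySem.List.pyGetD arr i 0
      let c := p.1.getD v 0 - 1
      (p.1.insert v c, p.2 ++ PySem.List.pyRepeat [v, v + 1] c)) (counts, [])).2

-- ===== PRECONDITION & SPEC =====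
-- Pre_ excludes n > len(arr), where A (and B) raise IndexError on arr[i].
def Pre_q8 (arr : List Int) (n : Int) : Prop := n ≤ (arr.length : Int)
instance (arr : List Int) (n : Int) : Decidable (Pre_q8 arr n) := by unfold Pre_q8; infer_instance
def pvWitness_q8 : List Int × Int := ([1, 1, 2, 1], 4)

def Spec_q8 (arr : List Int) (n : Int) (out : List Int) : Prop := out = q8_alt arr n
instance (arr : List Int) (n : Int) (out : List Int) : Decidable (Spec_q8 arr n out) := by unfold Spec_q8; infer_instance

-- ===== CLAIM (what is proved, stated in full; the proofs are below) =====
def Claim_equal_q8 : Prop := ∀ (arr : List Int) (n : Int), Dom_q8 arr n → Pre_q8 arr n → Spec_q8 arr n (q8 arr n)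

-- ===== LEMMAS AND PROOFS =====

-- common characterisation: per element, the later equal occurrences contribute [w, w+1] each, in order
def pvG : List Int → List Int
  | [] => []
  | v :: t => (t.filter (fun w => v == w)).flatMap (fun w => [w, w + 1]) ++ pvG t

lemma pv_emit_loop (v : Int) (t : List Int) (st : List Int) :
    t.foldl (fun acc w => if v == w then acc ++ [w, w + 1] else acc) st
      = st ++ (t.filter (fun w => v == w)).flatMap (fun w => [w, w + 1]) := by
  induction t generalizing st with
  | nil => simp
  | cons x t ih =>
    rw [List.foldl_cons, ih]
    by_cases h : v = x <;> simp [h]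

lemma pv_getD_take (arr : List Int) (n j : Int) (hn : n ≤ (arr.length : Int))
    (h0 : 0 ≤ j) (hj : j < n) :
    PySem.List.pyGetD arr j 0 = PySem.List.pyGetD (arr.take n.toNat) j 0 := by
  have hlen : (arr.take n.toNat).length = n.toNat := by
    simp; omega
  rw [PySem.List.pyGetD_eq_getElem arr 0 h0 (by omega),
      PySem.List.pyGetD_eq_getElem (arr.take n.toNat) 0 h0 (by rw [hlen]; omega)]
  rw [List.getElem_take]

lemma pv_loopA (arr : List Int) (n s : Int) (st : List Int)
    (h0 : 0 ≤ s) (hn : n ≤ (arr.length : Int)) :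
    (PySem.List.pyRange s n 1).foldl (fun stack i =>
      (PySem.List.pyRange (i + 1) n 1).foldl (fun stack j =>
        if PySem.List.pyGetD arr i 0 == PySem.List.pyGetD arr j 0 then
          stack ++ [PySem.List.pyGetD arr j 0, PySem.List.pyGetD arr j 0 + 1]
        else stack) stack) st
      = st ++ pvG ((arr.take n.toNat).drop s.toNat) := by
  by_cases hsn : n ≤ s
  · rw [PySem.List.pyRange_one_eq_nil hsn]
    have hd : (arr.take n.toNat).drop s.toNat = [] :=
      List.drop_eq_nil_of_le (by simp; omega)
    simp [hd, pvG]
  · replace hsn : s < n := by omega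
    rw [PySem.List.pyRange_one_cons (by omega : s < n), List.foldl_cons]
    have hlen : (arr.take n.toNat).length = n.toNat := by simp; omega
    have hcast : ((arr.take n.toNat).length : Int) = n := by rw [hlen]; omega
    have hinner : ∀ st2 : List Int,
        (PySem.List.pyRange (s + 1) n 1).foldl (fun stack j =>
          if PySem.List.pyGetD arr s 0 == PySem.List.pyGetD arr j 0 then
            stack ++ [PySem.List.pyGetD arr j 0, PySem.List.pyGetD arr j 0 + 1]
          else stack) st2
        = st2 ++ (((arr.take n.toNat).drop (s + 1).toNat).filter
            (fun w => PySem.List.pyGetD arr s 0 == w)).flatMap (fun w => [w, w + 1]) := by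
      intro st2
      rw [PySem.List.foldl_congr_mem _ _
        (fun stack j =>
          if PySem.List.pyGetD arr s 0 == PySem.List.pyGetD (arr.take n.toNat) j 0 then
            stack ++ [PySem.List.pyGetD (arr.take n.toNat) j 0,
              PySem.List.pyGetD (arr.take n.toNat) j 0 + 1]
          else stack) st2 ?_]
      · rw [show PySem.List.pyRange (s + 1) n 1
            = PySem.List.pyRange (s + 1) (((arr.take n.toNat).length : Int)) 1 from by
              rw [hcast],
          PySem.List.foldl_pyRange_pyGetD' (arr.take n.toNat) 0
            (fun acc w => if PySem.List.pyGetD arr s 0 == w then acc ++ [w, w + 1] else acc)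
            st2 (by omega : (0:Int) ≤ s + 1)]
        exact pv_emit_loop _ _ _
      · intro acc j hj
        rw [PySem.List.mem_pyRange_one] at hj
        dsimp only
        rw [pv_getD_take arr n j hn (by omega) (by omega)]
    rw [hinner]
    have hsx : s.toNat < (arr.take n.toNat).length := by omega
    have htemp : PySem.List.pyGetD arr s 0 = (arr.take n.toNat)[s.toNat] := by
      rw [pv_getD_take arr n s hn h0 hsn,
        PySem.List.pyGetD_eq_getElem (arr.take n.toNat) 0 h0 (by omega)]
    have hdrop : (arr.take n.toNat).drop s.toNat
        = (arr.take n.toNat)[s.toNat] :: (arr.take n.toNat).drop (s.toNat + 1) :=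
      List.drop_eq_getElem_cons hsx
    rw [pv_loopA arr n (s + 1) _ (by omega) hn]
    have hst : (s + 1).toNat = s.toNat + 1 := by omega
    rw [hst, hdrop, pvG, htemp]
    simp
termination_by (n - s).toNat
decreasing_by omega

lemma pv_A_eq (arr : List Int) (n : Int) (hn : n ≤ (arr.length : Int)) :
    q8 arr n = pvG (arr.take n.toNat) := by
  unfold q8
  rw [pv_loopA arr n 0 [] le_rfl hn]
  simp

lemma pv_rep_eq (w : Int) (t : List Int) :
    PySem.List.pyRepeat [w, w + 1] ((t.count w : Nat) : Int)
      = (t.filter (fun x => w == x)).flatMap (fun x => [x, x + 1]) := by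
  rw [show PySem.List.pyRepeat [w, w + 1] ((t.count w : Nat) : Int)
      = (List.replicate (t.count w) [w, w + 1]).flatten from by simp [PySem.List.pyRepeat]]
  induction t with
  | nil => simp
  | cons x t ih =>
    by_cases h : w = x
    · subst h
      simp [List.replicate_succ, ← ih]
    · simp [h, Ne.symm h, ← ih]

lemma pv_loopB (t : List Int) (d : PySem.Dict Int Int) (acc : List Int)
    (h : ∀ v : Int, d.getD v 0 = (t.count v : Int)) :
    (t.foldl (fun (p : PySem.Dict Int Int × List Int) v =>
        (p.1.insert v (p.1.getD v 0 - 1),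
         p.2 ++ PySem.List.pyRepeat [v, v + 1] (p.1.getD v 0 - 1))) (d, acc)).2
      = acc ++ pvG t := by
  induction t generalizing d acc with
  | nil => simp [pvG]
  | cons w t ih =>
    have hc : d.getD w 0 - 1 = (t.count w : Int) := by
      have hw := h w
      rw [List.count_cons_self] at hw
      push_cast at hw
      omega
    rw [List.foldl_cons]
    rw [ih (d.insert w (d.getD w 0 - 1)) _ ?_]
    · rw [hc, pv_rep_eq]
      simp [pvG]
    · intro v
      rw [PySem.Dict.getD_insert]
      by_cases hv : v = w
      · simpa [hv] using hc
      · rw [if_neg hv, h v]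
        simp [Ne.symm hv]

lemma pv_B_eq (arr : List Int) (n : Int) (hn : n ≤ (arr.length : Int)) :
    q8_alt arr n = pvG (arr.take n.toNat) := by
  unfold q8_alt
  dsimp only
  by_cases hn0 : 0 ≤ n
  · have hlen : (arr.take n.toNat).length = n.toNat := by simp; omega
    have hcast : ((arr.take n.toNat).length : Int) = n := by rw [hlen]; omega
    have hcongr1 : ∀ (β : Type) (f : β → Int → β) (init : β),
        (PySem.List.pyRange 0 n 1).foldl
          (fun acc i => f acc (PySem.List.pyGetD arr i 0)) init
        = (arr.take n.toNat).foldl f init := by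
      intro β f init
      rw [PySem.List.foldl_congr_mem _ _
        (fun acc i => f acc (PySem.List.pyGetD (arr.take n.toNat) i 0)) init ?_]
      · rw [show PySem.List.pyRange 0 n 1
            = PySem.List.pyRange 0 (((arr.take n.toNat).length : Int)) 1 from by
              rw [hcast],
          PySem.List.foldl_pyRange_pyGetD' (arr.take n.toNat) 0 f init
            (le_refl (0:Int))]
        simp
      · intro acc i hi
        rw [PySem.List.mem_pyRange_one] at hi
        dsimp only
        rw [pv_getD_take arr n i hn (by omega) (by omega)]
    rw [hcongr1 (PySem.Dict Int Int)
        (fun d v => d.insert v (d.getD v 0 + 1)) PySem.Dict.empty,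
      PySem.Dict.foldl_insert_getD_add_one_eq_counter,
      hcongr1 (PySem.Dict Int Int × List Int)
        (fun p v => (p.1.insert v (p.1.getD v 0 - 1),
          p.2 ++ PySem.List.pyRepeat [v, v + 1] (p.1.getD v 0 - 1)))
        (PySem.Dict.counter (arr.take n.toNat), [])]
    rw [pv_loopB (arr.take n.toNat) _ []
        (fun v => PySem.Dict.getD_counter (arr.take n.toNat) v)]
    simp
  · have hr : PySem.List.pyRange 0 n 1 = [] :=
      PySem.List.pyRange_one_eq_nil (by omega)
    have ht : n.toNat = 0 := by omega
    simp [hr, ht, pvG]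

-- ===== VERDICT (by name: the statement is the Claim_ definition above) =====
theorem q8_spec : Claim_equal_q8 := by
  intro arr n _ hpre
  unfold Spec_q8
  rw [pv_A_eq arr n hpre, pv_B_eq arr n hpre]
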